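-- pv_equiv track=rewrite | github.com/Kronic90/Mimirs-Memory-Hub | playground/tts_backend.py | _tts_segment
-- ===== SOURCE A (Python) =====
-- def _tts_segment(text: str, max_chars: int = 500) -> str:
--     """Return an appropriate-length segment for TTS synthesis."""
--     if len(text) <= max_chars:
--         return text
--     # Prefer to break at a sentence boundary
--     for punct in (".", "!", "?", "\n"):
--         idx = text.rfind(punct, 0, max_chars)
--         if idx > max_chars // 3:
--             return text[: idx + 1]
--     return text[:max_chars]
-- ===== SOURCE B (Python) =====
-- def _tts_segment(text: str, max_chars: int = 500) -> str:
--     """Return an appropriate-length segment for TTS synthesis."""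
--     if len(text) <= max_chars:
--         return text
--     seg = text[:max_chars]
--     threshold = max_chars // 3
--     found = {}
--     # ONE backward scan over the valid indices strictly above the threshold
--     # (indices are nonnegative, hence the clamp of the lower bound to -1):
--     # stop immediately at the first '.' seen (it is the last '.' in the window);
--     # remember the first-seen '!', '?', '\n' (their last positions) for the
--     # fallback priority decision below.
--     for i in range(len(seg) - 1, max(threshold, -1), -1):
--         ch = seg[i]
--         if ch == '.':
--             return text[: i + 1]
--         if ch in '!?\n' and ch not in found:
--             found[ch] = i
--     for punct in ('!', '?', '\n'):
--         if punct in found: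
--             return text[: found[punct] + 1]
--     return text[:max_chars]
-- ===== Notes on version B (the rewrite author's own statement) =====
-- stated objective: alternative
-- what changed: Replaces A's four separate backward rfind scans (one per punctuation, each over the whole window) by a single backward early-exit scan over only the indices strictly above the threshold, returning at the first '.' met and recording first-seen '!'/'?'/'\n' in a dict for the fallback priority decision.
-- intended difference: For max_chars <= -4 with a nonempty window text[:max_chars] containing no '.', A returns '' because the rfind sentinel -1 exceeds the negative threshold max_chars//3, while B returns the intended segment (the last '!'/'?'/newline cut, else text[:max_chars]); a nonempty segment is what the function is for. — e.g. on _tts_segment("abcde", -4): A returns "", B returns "a"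
import Mathlib
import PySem

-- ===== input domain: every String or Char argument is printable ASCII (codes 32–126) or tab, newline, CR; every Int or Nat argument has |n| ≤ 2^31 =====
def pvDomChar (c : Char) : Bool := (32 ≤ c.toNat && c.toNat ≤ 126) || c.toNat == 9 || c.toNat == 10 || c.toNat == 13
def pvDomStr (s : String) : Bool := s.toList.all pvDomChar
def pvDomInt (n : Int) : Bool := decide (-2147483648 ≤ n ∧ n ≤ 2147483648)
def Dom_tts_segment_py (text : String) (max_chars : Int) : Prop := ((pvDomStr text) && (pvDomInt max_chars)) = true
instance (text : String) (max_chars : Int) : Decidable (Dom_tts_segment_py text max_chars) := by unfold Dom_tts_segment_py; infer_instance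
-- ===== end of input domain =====

-- B replaces A's four whole-window rfind passes by ONE backward early-exit scan over the
-- indices strictly above the threshold; on negative max_chars ≤ -4 A's sentinel comparison
-- (-1 > max_chars//3) makes A return "", B returns the intended segment (see D_ below).

-- ===== PORT A =====
-- text.rfind(c, 0, end) = last index of c in text[0:end] (slice clamping), or -1;
-- ported exactly as a structural last-index search over the sliced region.
def pvLastIdx (l : List Char) (c : Char) : Int :=
  match l with
  | [] => -1
  | x :: xs =>
    let r := pvLastIdx xs c
    if r ≥ 0 then r + 1 else if x = c then 0 else -1

def tts_segment_py (text : String) (max_chars : Int) : String :=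
  let s := text.toList
  if (s.length : Int) ≤ max_chars then text
  else
    -- for punct in (".", "!", "?", "\n"): idx = text.rfind(punct, 0, max_chars); …
    let i1 := pvLastIdx (PySem.List.slice s (some 0) (some max_chars)) '.'
    if i1 > PySem.Int.floordiv max_chars 3 then String.ofList (PySem.List.slice s none (some (i1 + 1)))
    else
      let i2 := pvLastIdx (PySem.List.slice s (some 0) (some max_chars)) '!'
      if i2 > PySem.Int.floordiv max_chars 3 then String.ofList (PySem.List.slice s none (some (i2 + 1)))
      else
        let i3 := pvLastIdx (PySem.List.slice s (some 0) (some max_chars)) '?'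
        if i3 > PySem.Int.floordiv max_chars 3 then String.ofList (PySem.List.slice s none (some (i3 + 1)))
        else
          let i4 := pvLastIdx (PySem.List.slice s (some 0) (some max_chars)) '\n'
          if i4 > PySem.Int.floordiv max_chars 3 then String.ofList (PySem.List.slice s none (some (i4 + 1)))
          else String.ofList (PySem.List.slice s none (some max_chars))

-- ===== PORT B =====
-- Loop body of Source B's single backward scan: state = early return index ('.' found) ⊕ the
-- dict of first-seen '!'/'?'/'\n'.  'ch in "!?\n"' is the disjunction; 'ch not in found'
-- is found.get? ch = none.  The pyGet? none arm is a totality guard only (i is in range).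
def pvStepB (seg : List Char) (st : Int ⊕ PySem.Dict Char Int) (i : Int) : Int ⊕ PySem.Dict Char Int :=
  match st with
  | .inl r => .inl r
  | .inr found =>
    match PySem.List.pyGet? seg i with
    | none => .inr found
    | some ch =>
      if ch = '.' then .inl i
      else if (ch = '!' ∨ ch = '?' ∨ ch = '\n') ∧ found.get? ch = none then .inr (found.insert ch i)
      else .inr found

def tts_segment_py_alt (text : String) (max_chars : Int) : String :=
  let s := text.toList
  if (s.length : Int) ≤ max_chars then text
  else
    let seg := PySem.List.slice s none (some max_chars)
    let threshold := PySem.Int.floordiv max_chars 3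
    -- for i in range(len(seg) - 1, max(threshold, -1), -1): …
    match (PySem.List.pyRange ((seg.length : Int) - 1) (max threshold (-1)) (-1)).foldl
        (pvStepB seg) (.inr PySem.Dict.empty) with
    | .inl i => String.ofList (PySem.List.slice s none (some (i + 1)))
    | .inr found =>
      -- for punct in ('!', '?', '\n'): if punct in found: return text[:found[punct]+1]
      match found.get? '!' with
      | some j => String.ofList (PySem.List.slice s none (some (j + 1)))
      | none =>
        match found.get? '?' with
        | some j => String.ofList (PySem.List.slice s none (some (j + 1)))
        | none =>
          match found.get? '\n' with
          | some j => String.ofList (PySem.List.slice s none (some (j + 1)))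
          | none => String.ofList (PySem.List.slice s none (some max_chars))

-- ===== PRECONDITION & SPEC =====
-- For max_chars ≤ -4 with a nonempty window text[:max_chars] containing no '.', A returns ''
-- (the rfind sentinel -1 exceeds the negative threshold max_chars//3) while B returns the
-- intended nonempty segment; a nonempty segment is what the function is for.
def D_tts_segment_py (text : String) (max_chars : Int) : Prop :=
  max_chars ≤ -4 ∧ 0 < (text.toList.length : Int) + max_chars ∧
    '.' ∉ text.toList.take (text.toList.length - (-max_chars).toNat)
instance (text : String) (max_chars : Int) : Decidable (D_tts_segment_py text max_chars) := by
  unfold D_tts_segment_py; infer_instance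

def Spec_tts_segment_py (text : String) (max_chars : Int) (out : String) : Prop :=
  ¬ D_tts_segment_py text max_chars → out = tts_segment_py_alt text max_chars
instance (text : String) (max_chars : Int) (out : String) : Decidable (Spec_tts_segment_py text max_chars out) := by
  unfold Spec_tts_segment_py; infer_instance

def pvDiffWitness_tts_segment_py : String × Int := ("abcde", -4)
def pvDiffWitnessOut_tts_segment_py : String × String := ("", "a")

-- ===== CLAIM (what is proved, stated in full; the proofs are below) =====
def Claim_unchanged_tts_segment_py : Prop := ∀ (text : String) (max_chars : Int), Dom_tts_segment_py text max_chars → Spec_tts_segment_py text max_chars (tts_segment_py text max_chars)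
def Claim_changed_tts_segment_py : Prop := Dom_tts_segment_py (pvDiffWitness_tts_segment_py.1) (pvDiffWitness_tts_segment_py.2) ∧ D_tts_segment_py (pvDiffWitness_tts_segment_py.1) (pvDiffWitness_tts_segment_py.2) ∧ tts_segment_py (pvDiffWitness_tts_segment_py.1) (pvDiffWitness_tts_segment_py.2) = pvDiffWitnessOut_tts_segment_py.1 ∧ tts_segment_py_alt (pvDiffWitness_tts_segment_py.1) (pvDiffWitness_tts_segment_py.2) = pvDiffWitnessOut_tts_segment_py.2 ∧ pvDiffWitnessOut_tts_segment_py.1 ≠ pvDiffWitnessOut_tts_segment_py.2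
def Claim_exact_tts_segment_py : Prop := ∀ (text : String) (max_chars : Int), Dom_tts_segment_py text max_chars → D_tts_segment_py text max_chars → tts_segment_py text max_chars ≠ tts_segment_py_alt text max_chars

-- ===== LEMMAS AND PROOFS =====

lemma pvLastIdx_bounds (l : List Char) (c : Char) :
    pvLastIdx l c = -1 ∨ (0 ≤ pvLastIdx l c ∧ pvLastIdx l c < (l.length : Int)) := by
  induction l with
  | nil => left; rfl
  | cons x xs ih =>
    simp only [pvLastIdx, List.length_cons]
    rcases ih with h | h
    · rw [h, if_neg (by norm_num)]
      by_cases hx : x = c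
      · rw [if_pos hx]; right; refine ⟨le_refl 0, ?_⟩; push_cast; omega
      · rw [if_neg hx]; left; rfl
    · rw [if_pos (by omega)]; right; push_cast; omega

lemma pvLastIdx_concat (ys : List Char) (c d : Char) :
    pvLastIdx (ys ++ [c]) d = if c = d then (ys.length : Int) else pvLastIdx ys d := by
  induction ys with
  | nil => by_cases h : c = d <;> simp [pvLastIdx, h]
  | cons x xs ih =>
    simp only [List.cons_append, pvLastIdx, ih, List.length_cons]
    by_cases h : c = d
    · rw [if_pos h, if_pos h, if_pos (by positivity)]; push_cast; ring
    · rw [if_neg h, if_neg h]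

lemma pvLastIdx_eq_neg_one_iff (l : List Char) (c : Char) :
    pvLastIdx l c = -1 ↔ c ∉ l := by
  induction l with
  | nil => simp [pvLastIdx]
  | cons x xs ih =>
    simp only [pvLastIdx, List.mem_cons]
    rcases pvLastIdx_bounds xs c with h | h
    · rw [h, if_neg (by norm_num)]
      have hx' : c ∉ xs := ih.mp h
      by_cases hx : x = c
      · rw [if_pos hx]
        constructor
        · intro h0; exact absurd h0 (by norm_num)
        · intro hcon; exact absurd (Or.inl hx.symm) hcon
      · rw [if_neg hx]
        constructor
        · intro _
          rintro (h1 | h2)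
          · exact hx h1.symm
          · exact hx' h2
        · intro _; rfl
    · rw [if_pos (by omega)]
      constructor
      · intro h'; omega
      · intro hcon
        have hne : pvLastIdx xs c = -1 := ih.mpr (fun hm => hcon (Or.inr hm))
        omega

lemma pvStepB_absorb (seg : List Char) (L : List Int) (r : Int) :
    L.foldl (pvStepB seg) (.inl r) = .inl r := by
  induction L with
  | nil => rfl
  | cons i L ih => simpa [pvStepB] using ih

lemma pvLoopB (seg : List Char) (lo : Int) (hlo : -1 ≤ lo) (k : Nat) (hk : k ≤ seg.length)
    (found : PySem.Dict Char Int) :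
    (pvLastIdx (seg.take k) '.' > lo →
      (PySem.List.pyRange ((k : Int) - 1) lo (-1)).foldl (pvStepB seg) (.inr found)
        = .inl (pvLastIdx (seg.take k) '.'))
    ∧ (¬ pvLastIdx (seg.take k) '.' > lo →
      ∃ d, (PySem.List.pyRange ((k : Int) - 1) lo (-1)).foldl (pvStepB seg) (.inr found) = .inr d ∧
        ∀ c, c = '!' ∨ c = '?' ∨ c = '\n' →
          d.get? c = (found.get? c).or
            (if pvLastIdx (seg.take k) c > lo then some (pvLastIdx (seg.take k) c) else none)) := by
  induction k generalizing found with
  | zero =>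
    rw [show ((0 : Nat) : Int) - 1 = -1 by norm_num, PySem.List.pyRange_neg_one_eq_nil hlo]
    constructor
    · intro h
      simp only [List.take_zero, pvLastIdx] at h
      omega
    · intro _
      refine ⟨found, rfl, ?_⟩
      intro c _
      rw [if_neg (by simp only [List.take_zero, pvLastIdx]; omega)]
      cases found.get? c <;> simp [Option.or]
  | succ k ih =>
    have hk' : k < seg.length := hk
    have htake : seg.take (k + 1) = seg.take k ++ [seg[k]] := by
      rw [List.take_add_one, List.getElem?_eq_getElem hk']; rfl
    have hlen : ((seg.take k).length : Int) = (k : Int) := by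
      simp [List.length_take, Nat.min_eq_left (le_of_lt hk')]
    have hcast : ((k + 1 : Nat) : Int) - 1 = (k : Int) := by push_cast; ring
    rw [hcast]
    by_cases hgt : lo < (k : Int)
    swap
    · -- range is empty: every index of take (k+1) is ≤ k ≤ lo
      rw [PySem.List.pyRange_neg_one_eq_nil (by omega)]
      have hb : ∀ c : Char, ¬ pvLastIdx (seg.take (k + 1)) c > lo := by
        intro c
        rcases pvLastIdx_bounds (seg.take (k + 1)) c with h | h
        · omega
        · have hlt : ((seg.take (k + 1)).length : Int) ≤ (k : Int) + 1 := by
            simp only [List.length_take]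
            push_cast
            omega
          omega
      refine ⟨fun h => absurd h (hb '.'), fun _ => ⟨found, rfl, ?_⟩⟩
      intro c _
      rw [if_neg (hb c)]
      cases found.get? c <;> simp [Option.or]
    · rw [PySem.List.pyRange_neg_one_cons hgt]
      have hchar : pvLastIdx (seg.take (k + 1)) '.' =
          if seg[k] = '.' then (k : Int) else pvLastIdx (seg.take k) '.' := by
        rw [htake, pvLastIdx_concat, hlen]
      have hgetk : PySem.List.pyGet? seg ((k : Int)) = some seg[k] := by
        simp [PySem.List.pyGet?_natCast, List.getElem?_eq_getElem hk']
      by_cases hdot : seg[k] = '.'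
      · -- early return at k
        have hstep : pvStepB seg (.inr found) (k : Int) = .inl (k : Int) := by
          simp [pvStepB, hgetk, hdot]
        rw [List.foldl_cons, hstep, pvStepB_absorb]
        rw [hchar, if_pos hdot]
        exact ⟨fun _ => rfl, fun h => absurd hgt (by omega)⟩
      · have hcc : ∀ c, pvLastIdx (seg.take (k + 1)) c =
            if seg[k] = c then (k : Int) else pvLastIdx (seg.take k) c := by
          intro c; rw [htake, pvLastIdx_concat, hlen]
        -- step keeps the .inr shape; found' is insert or found
        by_cases hins : (seg[k] = '!' ∨ seg[k] = '?' ∨ seg[k] = '\n') ∧ found.get? seg[k] = none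
        · have hstep : pvStepB seg (.inr found) (k : Int) = .inr (found.insert seg[k] (k : Int)) := by
            simp only [pvStepB, hgetk]
            rw [if_neg hdot, if_pos hins]
          rw [List.foldl_cons, hstep]
          obtain ⟨ihl, ihr⟩ := ih (le_of_lt hk') (found.insert seg[k] (k : Int))
          constructor
          · intro h
            rw [hchar, if_neg hdot] at h
            rw [ihl h, hchar, if_neg hdot]
          · intro h
            rw [hchar, if_neg hdot] at h
            obtain ⟨d, hd, hprop⟩ := ihr h
            refine ⟨d, hd, ?_⟩
            intro c hc
            rw [hprop c hc, hcc c]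
            by_cases hce : seg[k] = c
            · subst hce
              rw [PySem.Dict.get?_insert_self]
              simp [hins.2, hgt, Option.or]
            · have hne : c ≠ seg[k] := fun h' => hce h'.symm
              rw [PySem.Dict.get?_insert_of_ne _ _ hne, if_neg hce]
        · have hstep : pvStepB seg (.inr found) (k : Int) = .inr found := by
            simp only [pvStepB, hgetk]
            rw [if_neg hdot, if_neg hins]
          rw [List.foldl_cons, hstep]
          obtain ⟨ihl, ihr⟩ := ih (le_of_lt hk') found
          constructor
          · intro h
            rw [hchar, if_neg hdot] at h
            rw [ihl h, hchar, if_neg hdot]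
          · intro h
            rw [hchar, if_neg hdot] at h
            obtain ⟨d, hd, hprop⟩ := ihr h
            refine ⟨d, hd, ?_⟩
            intro c hc
            rw [hprop c hc, hcc c]
            by_cases hce : seg[k] = c
            · subst hce
              have : ∃ v, found.get? seg[k] = some v := by
                rcases hfk : found.get? seg[k] with _ | v
                · exact absurd ⟨hc, hfk⟩ hins
                · exact ⟨v, rfl⟩
              obtain ⟨v, hv⟩ := this
              rw [hv]; simp [Option.or]
            · rw [if_neg hce]

-- B in the else-branch, expressed as the four-way priority chain over pvLastIdx.
lemma altB_eq (text : String) (m : Int) (h : ¬ ((text.toList.length : Int) ≤ m)) :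
    tts_segment_py_alt text m =
      (let s := text.toList
       let seg := PySem.List.slice s none (some m)
       let lo := max (PySem.Int.floordiv m 3) (-1)
       if pvLastIdx seg '.' > lo then String.ofList (PySem.List.slice s none (some (pvLastIdx seg '.' + 1)))
       else if pvLastIdx seg '!' > lo then String.ofList (PySem.List.slice s none (some (pvLastIdx seg '!' + 1)))
       else if pvLastIdx seg '?' > lo then String.ofList (PySem.List.slice s none (some (pvLastIdx seg '?' + 1)))
       else if pvLastIdx seg '\n' > lo then String.ofList (PySem.List.slice s none (some (pvLastIdx seg '\n' + 1)))
       else String.ofList (PySem.List.slice s none (some m))) := by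
  simp only [tts_segment_py_alt]
  rw [if_neg h]
  set s := text.toList
  set seg := PySem.List.slice s none (some m) with hseg
  set lo := max (PySem.Int.floordiv m 3) (-1) with hlodef
  have hlo : -1 ≤ lo := le_max_right _ _
  obtain ⟨h1, h2⟩ := pvLoopB seg lo hlo seg.length (le_refl _) PySem.Dict.empty
  rw [List.take_length] at h1 h2
  by_cases hd : pvLastIdx seg '.' > lo
  · rw [h1 hd, if_pos hd]
  · obtain ⟨d, hres, hprop⟩ := h2 hd
    rw [hres, if_neg hd]
    have hget : ∀ c, c = '!' ∨ c = '?' ∨ c = '\n' →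
        d.get? c = if pvLastIdx seg c > lo then some (pvLastIdx seg c) else none := by
      intro c hc
      rw [hprop c hc, PySem.Dict.get?_empty]
      simp [Option.or]
    by_cases hb : pvLastIdx seg '!' > lo
    · simp only [hget '!' (Or.inl rfl), if_pos hb]
    · by_cases hq : pvLastIdx seg '?' > lo
      · simp only [hget '!' (Or.inl rfl), hget '?' (Or.inr (Or.inl rfl)), if_neg hb, if_pos hq]
      · by_cases hn : pvLastIdx seg '\n' > lo
        · simp only [hget '!' (Or.inl rfl), hget '?' (Or.inr (Or.inl rfl)),
            hget '\n' (Or.inr (Or.inr rfl)), if_neg hb, if_neg hq, if_pos hn]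
        · simp only [hget '!' (Or.inl rfl), hget '?' (Or.inr (Or.inl rfl)),
            hget '\n' (Or.inr (Or.inr rfl)), if_neg hb, if_neg hq, if_neg hn]

lemma pvToListOfList (l : List Char) : (String.ofList l).toList = l := by simp

-- the window text[:m] for negative m ≤ -4, as a take
lemma pvSegNeg (s : List Char) (m : Int) (hm : m ≤ -4) :
    PySem.List.slice s none (some m) = s.take (s.length - (-m).toNat) := by
  have hmeq : m = -(((-m).toNat : Nat) : Int) := by omega
  conv_lhs => rw [hmeq]
  exact PySem.List.slice_to_neg_natCast s _ (by omega)

-- m ≤ -4 whenever floordiv m 3 ≤ -2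
lemma pvFloorNeg (m : Int) (h : PySem.Int.floordiv m 3 ≤ -2) : m ≤ -4 := by
  have h1 := PySem.Int.floordiv_mul_add_mod m 3
  have h2 := PySem.Int.mod_nonneg m (by norm_num : (0:Int) < 3)
  have h3 := PySem.Int.mod_lt m (by norm_num : (0:Int) < 3)
  omega

lemma pvFloorLe (m : Int) (h : m ≤ -4) : PySem.Int.floordiv m 3 ≤ -2 := by
  have h1 := PySem.Int.floordiv_mul_add_mod m 3
  have h2 := PySem.Int.mod_nonneg m (by norm_num : (0:Int) < 3)
  have h3 := PySem.Int.mod_lt m (by norm_num : (0:Int) < 3)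
  omega

-- ===== VERDICT (by name: the statements are the Claim_ definitions above) =====
theorem tts_segment_py_spec : Claim_unchanged_tts_segment_py := by
  intro text m _ hnd
  by_cases hlen : ((text.toList.length : Int) ≤ m)
  · simp only [tts_segment_py, tts_segment_py_alt, if_pos hlen]
  · rw [altB_eq text m hlen]
    simp only [tts_segment_py, if_neg hlen, PySem.List.slice_zero_start]
    by_cases hto : -1 ≤ PySem.Int.floordiv m 3
    · rw [max_eq_left hto]
    · have ht2 : PySem.Int.floordiv m 3 ≤ -2 := by omega
      have hm4 : m ≤ -4 := pvFloorNeg m ht2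
      rw [max_eq_right (by omega : PySem.Int.floordiv m 3 ≤ -1)]
      have hsege := pvSegNeg text.toList m hm4
      rw [hsege]
      by_cases hlen2 : 0 < (text.toList.length : Int) + m
      · -- outside D_, so '.' occurs in the window
        have hdot : '.' ∈ text.toList.take (text.toList.length - (-m).toNat) := by
          by_contra hco
          exact hnd ⟨hm4, hlen2, hco⟩
        have hne : pvLastIdx (text.toList.take (text.toList.length - (-m).toNat)) '.' ≠ -1 :=
          fun h => (pvLastIdx_eq_neg_one_iff _ '.').mp h hdot
        have hge : 0 ≤ pvLastIdx (text.toList.take (text.toList.length - (-m).toNat)) '.' := by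
          rcases pvLastIdx_bounds (text.toList.take (text.toList.length - (-m).toNat)) '.' with h | h
          · exact absurd h hne
          · exact h.1
        rw [if_pos (by omega), if_pos (by omega)]
      · -- the window is empty: both sides slice to the empty string
        have hz : text.toList.length - (-m).toNat = 0 := by omega
        rw [hz, List.take_zero]
        have hL : ∀ c : Char, pvLastIdx ([] : List Char) c = -1 := fun _ => rfl
        rw [hL '.', hL '!', hL '?', hL '\n']
        rw [if_pos (by omega : (-1 : Int) > PySem.Int.floordiv m 3)]
        rw [if_neg (by omega : ¬ ((-1 : Int) > -1)), if_neg (by omega : ¬ ((-1 : Int) > -1)),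
            if_neg (by omega : ¬ ((-1 : Int) > -1)), if_neg (by omega : ¬ ((-1 : Int) > -1))]
        rw [show (-1 : Int) + 1 = 0 by norm_num,
            PySem.List.slice_to text.toList (le_refl (0 : Int))]
        simp

theorem tts_segment_py_changed : Claim_changed_tts_segment_py := by
  unfold Claim_changed_tts_segment_py; decide

theorem tts_segment_py_tight : Claim_exact_tts_segment_py := by
  intro text m _ hD
  obtain ⟨hm4, hlen2, hdot⟩ := hD
  have hlen : ¬ ((text.toList.length : Int) ≤ m) := by omega
  have ht2 : PySem.Int.floordiv m 3 ≤ -2 := pvFloorLe m hm4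
  have hsege := pvSegNeg text.toList m hm4
  have hsne : text.toList ≠ [] := by
    have : 0 < text.toList.length := by omega
    exact List.ne_nil_of_length_pos this
  have hLdot : pvLastIdx (PySem.List.slice text.toList none (some m)) '.' = -1 := by
    rw [hsege]
    exact (pvLastIdx_eq_neg_one_iff _ '.').mpr hdot
  -- A returns ""
  have hA : (tts_segment_py text m).toList = [] := by
    simp only [tts_segment_py, if_neg hlen, PySem.List.slice_zero_start]
    rw [hLdot, if_pos (by omega : (-1 : Int) > PySem.Int.floordiv m 3)]
    rw [show (-1 : Int) + 1 = 0 by norm_num,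
        PySem.List.slice_to text.toList (le_refl (0 : Int))]
    simp
  -- B returns a nonempty prefix
  have hB : (tts_segment_py_alt text m).toList ≠ [] := by
    rw [altB_eq text m hlen]
    simp only []
    rw [max_eq_right (by omega : PySem.Int.floordiv m 3 ≤ -1)]
    rw [hLdot, if_neg (by omega : ¬ ((-1 : Int) > -1))]
    have hbranch : ∀ j : Int, j > -1 →
        (String.ofList (PySem.List.slice text.toList none (some (j + 1)))).toList ≠ [] := by
      intro j hj
      rw [PySem.List.slice_to text.toList (by omega : (0 : Int) ≤ j + 1), pvToListOfList]
      intro hcon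
      rcases List.take_eq_nil_iff.mp hcon with h | h
      · omega
      · exact hsne h
    by_cases hb : pvLastIdx (PySem.List.slice text.toList none (some m)) '!' > -1
    · rw [if_pos hb]; exact hbranch _ hb
    · rw [if_neg hb]
      by_cases hq : pvLastIdx (PySem.List.slice text.toList none (some m)) '?' > -1
      · rw [if_pos hq]; exact hbranch _ hq
      · rw [if_neg hq]
        by_cases hn : pvLastIdx (PySem.List.slice text.toList none (some m)) '\n' > -1
        · rw [if_pos hn]; exact hbranch _ hn
        · rw [if_neg hn]
          rw [hsege, pvToListOfList]
          intro hcon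
          rcases List.take_eq_nil_iff.mp hcon with h | h
          · omega
          · exact hsne h
  intro heq
  rw [heq] at hA
  exact hB hA
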